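-- pv_equiv track=rewrite | github.com/hugomailhot/LIN205A | scripts/preprocess_tweebank.py | furthest_descendant
-- ===== SOURCE A (Python) =====
-- def furthest_descendant(i, head, direction):
--     if direction == 'left':
--         if i not in head[:i]:  # no child to the left
--             return i
--         else:
--             lc = head.index(i)  # leftmost child
--             return furthest_descendant(lc, head, 'left')
--     else:
--         if i not in head[i+1:]:  # no child to the right
--             return i
--         else:
--             rc = len(head) - 1 - head[::-1].index(i)  # rightmost child
--             return furthest_descendant(rc, head, 'right')
-- ===== SOURCE B (Python) =====
-- def furthest_descendant(i, head, direction):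
--     first = {}
--     last = {}
--     for j, h in enumerate(head):
--         first.setdefault(h, j)
--         last[h] = j
--     cur = i
--     if direction == 'left':
--         while cur in first and first[cur] < cur:
--             cur = first[cur]
--     else:
--         while cur in last and last[cur] > cur:
--             cur = last[cur]
--     return cur
-- ===== Notes on version B (the rewrite author's own statement) =====
-- stated objective: alternative
-- what changed: A recursively rescans the list at every step (slice membership test, .index, and a full list reversal per step); B builds first-occurrence and last-occurrence dictionaries in one pass over enumerate(head) and then follows the child chain with an iterative loop of O(1) lookups.
-- intended difference: On negative node indices i that occur as a value in head in the right place (first occurrence before position len(head)+i for 'left'; i < -1 with last occurrence at or after len(head)+i+1 for the right direction), A's Python slice wraps the negative index around and A returns the accidental result of that wraparound (a descendant index for some such i, i itself for others), while B treats i as an ordinary node id with no slice wraparound and returns the other value; node indices are nonnegative, so B's behaviour is the natural one on this corner. — e.g. on furthest_descendant(-1, ([-1, 0], "left")): A returns 0, B returns -1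
import Mathlib
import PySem

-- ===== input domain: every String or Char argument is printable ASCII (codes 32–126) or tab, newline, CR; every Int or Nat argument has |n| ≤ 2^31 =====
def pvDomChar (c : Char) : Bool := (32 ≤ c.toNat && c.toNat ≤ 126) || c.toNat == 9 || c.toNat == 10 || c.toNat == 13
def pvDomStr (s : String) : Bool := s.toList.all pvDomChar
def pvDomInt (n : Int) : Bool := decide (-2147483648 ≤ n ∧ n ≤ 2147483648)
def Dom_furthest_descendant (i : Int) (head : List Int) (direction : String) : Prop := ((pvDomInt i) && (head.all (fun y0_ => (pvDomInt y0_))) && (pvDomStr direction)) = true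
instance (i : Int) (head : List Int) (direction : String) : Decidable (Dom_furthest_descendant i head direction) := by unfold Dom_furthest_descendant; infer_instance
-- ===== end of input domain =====

-- B replaces A's recursive per-step list scans (slice membership, .index, a reversal per step)
-- by first/last-occurrence dictionaries built in one pass, then follows the child chain with an
-- iterative loop of O(1) lookups; on negative start indices i (where A's behaviour comes from
-- Python's slice wraparound) B treats i as an ordinary node id — see D_ below.

-- ===== PORT A =====

-- helper lemma cited by the ports' termination proofs: xs[:b] is a clamped take
theorem fd_slice_none_some {α : Type} (xs : List α) (b : Int) :
    PySem.List.slice xs none (some b) = xs.take (PySem.List.clampIdx xs.length b) := by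
  simp [PySem.List.slice]

-- membership in a prefix is 'first occurrence lies before the cut' (cited in decreasing_by)
theorem fd_mem_take_iff (xs : List Int) (v : Int) (m : Nat) :
    v ∈ xs.take m ↔ ∃ j, PySem.List.index? xs v = some j ∧ j < m := by
  induction xs generalizing m with
  | nil => simp [PySem.List.index?, List.idxOf?]
  | cons x xs ih =>
    cases m with
    | zero => simp
    | succ m =>
      by_cases hx : x = v
      · subst hx
        rw [PySem.List.index?_cons_self]
        simp
      · rw [PySem.List.index?_cons_of_ne xs hx]
        rw [List.take_succ_cons, List.mem_cons]
        rw [ih m]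
        constructor
        · rintro (h | ⟨j, hj, hjm⟩)
          · exact absurd h.symm hx
          · exact ⟨j + 1, by rw [hj]; rfl, by omega⟩
        · rintro ⟨j, hj, hjm⟩
          cases hji : PySem.List.index? xs v with
          | none => rw [hji] at hj; simp at hj
          | some j' =>
            rw [hji] at hj
            simp only [Option.map_some, Option.some.injEq] at hj
            exact Or.inr ⟨j', rfl, by omega⟩

-- membership in a suffix is 'last occurrence lies at/after the cut', phrased with the
-- first occurrence in the reversed list (cited in decreasing_by)
theorem fd_mem_drop_iff (xs : List Int) (v : Int) (s : Nat) :
    v ∈ xs.drop s ↔ ∃ r, PySem.List.index? xs.reverse v = some r ∧ s + r < xs.length := by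
  rw [← List.mem_reverse, List.reverse_drop, fd_mem_take_iff]
  constructor <;> rintro ⟨r, hr, h⟩ <;> refine ⟨r, hr, ?_⟩
  · omega
  · obtain ⟨hk, -, -⟩ := PySem.List.getElem_of_index?_eq_some hr
    simp only [List.length_reverse] at hk
    omega

theorem fd_clampIdx_cases (n : Nat) (k : Int) :
    (0 ≤ k → (PySem.List.clampIdx n k : Int) = min k n) ∧
    (k < 0 → (PySem.List.clampIdx n k : Int) = max ((n : Int) + k) 0) := by
  unfold PySem.List.clampIdx
  constructor <;> intro h <;> split_ifs <;> omega

-- port of A: literal recursion; head.index(i) cannot raise under the membership guard,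
-- so its result is taken with .getD 0 (the default is never used)
def furthest_descendant (i : Int) (head : List Int) (direction : String) : Int :=
  if hd : direction = "left" then
    if hm : i ∉ PySem.List.slice head none (some i) then i  -- no child to the left
    else
      -- lc = head.index(i)  (leftmost child)
      let lc : Int := ((PySem.List.index? head i).getD 0 : Nat)
      furthest_descendant lc head "left"
  else
    if hm : i ∉ PySem.List.slice head (some (i + 1)) none then i  -- no child to the right
    else
      -- rc = len(head) - 1 - head[::-1].index(i); head[::-1] is head.reverse
      -- (PySem.List.slice?_none_none_neg_one)
      let rc : Int := (head.length : Int) - 1 - ((PySem.List.index? head.reverse i).getD 0 : Nat)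
      furthest_descendant rc head "right"
termination_by
  if direction = "left" then
    (if i < 0 then (head.length : Int) + i else min i (head.length : Int)).toNat
  else head.length - PySem.List.clampIdx head.length (i + 1)
decreasing_by
  · -- left branch
    rw [Decidable.not_not] at hm
    rw [fd_slice_none_some] at hm
    rw [fd_mem_take_iff] at hm
    obtain ⟨j, hj, hjlt⟩ := hm
    simp only [hj, Option.getD_some, if_pos hd]
    have hc := fd_clampIdx_cases head.length i
    have hj0 : ¬ ((j : Int) < 0) := by omega
    rw [if_neg hj0]
    by_cases hi : i < 0
    · rw [if_pos hi]; simp only [reduceIte]; have := hc.2 hi; omega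
    · rw [if_neg hi]; simp only [reduceIte]; have := hc.1 (by omega); omega
  · -- right branch
    rw [Decidable.not_not] at hm
    rw [PySem.List.slice_some_none] at hm
    rw [fd_mem_drop_iff] at hm
    obtain ⟨r, hr, hrn⟩ := hm
    have hrlen : r < head.reverse.length := by
      obtain ⟨hk, -, -⟩ := PySem.List.getElem_of_index?_eq_some hr
      exact hk
    simp only [List.length_reverse] at hrlen
    simp only [List.unattach_reverse, List.unattach_attach, hr, Option.getD_some, if_neg hd]
    have hnr : ¬ ("right" : String) = "left" := by decide
    rw [if_neg hnr]
    have h1 := (fd_clampIdx_cases head.length ((head.length : Int) - 1 - (r : Int) + 1)).1 (by omega)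
    omega

-- ===== PORT B =====

-- one pass over enumerate(head): {value ↦ first index} (setdefault) and {value ↦ last index}
def fdDicts (head : List Int) : PySem.Dict Int Int × PySem.Dict Int Int :=
  (PySem.List.enumerate head).foldl
    (fun fl jh =>
      ((if fl.1.contains jh.2 then fl.1 else fl.1.insert jh.2 jh.1), fl.2.insert jh.2 jh.1))
    (PySem.Dict.empty, PySem.Dict.empty)

-- while cur in first and first[cur] < cur: cur = first[cur]
-- (fuel only makes the loop total for an arbitrary dictionary; the call site passes
-- head.length + 2, which the equivalence proof shows is never exhausted)
def fdLeft (first : PySem.Dict Int Int) (fuel : Nat) (cur : Int) : Int :=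
  match fuel with
  | 0 => cur
  | fuel + 1 =>
    match first.get? cur with
    | none => cur
    | some j => if j < cur then fdLeft first fuel j else cur

-- while cur in last and last[cur] > cur: cur = last[cur]
def fdRight (last : PySem.Dict Int Int) (fuel : Nat) (cur : Int) : Int :=
  match fuel with
  | 0 => cur
  | fuel + 1 =>
    match last.get? cur with
    | none => cur
    | some j => if cur < j then fdRight last fuel j else cur

def furthest_descendant_alt (i : Int) (head : List Int) (direction : String) : Int :=
  if direction = "left" then fdLeft (fdDicts head).1 (head.length + 2) i
  else fdRight (fdDicts head).2 (head.length + 2) i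

-- ===== PRECONDITION & SPEC =====

-- On negative i that occurs as a value in head in the right place (first occurrence before
-- position len(head)+i for 'left'; i < -1 with last occurrence at or after len(head)+i+1 for
-- the right direction), A's Python slice wraps the negative index around and returns the
-- accidental result of that wraparound, while B treats i as an ordinary node id (no children
-- to its left / its rightmost child for any direction); node indices are nonnegative, so B's
-- behaviour is the natural one on this corner.
def D_furthest_descendant (i : Int) (head : List Int) (direction : String) : Prop :=
  i < 0 ∧
    ((if direction = "left"
      then (PySem.List.index? head i).any fun j => decide ((j : Int) < (head.length : Int) + i)
      else (PySem.List.index? head.reverse i).any fun r =>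
        decide (i < -1 ∧ 0 < i + (r : Int) + 2)) = true)
instance (i : Int) (head : List Int) (direction : String) : Decidable (D_furthest_descendant i head direction) := by unfold D_furthest_descendant; infer_instance

def Spec_furthest_descendant (i : Int) (head : List Int) (direction : String) (out : Int) : Prop := ¬ D_furthest_descendant i head direction → out = furthest_descendant_alt i head direction
instance (i : Int) (head : List Int) (direction : String) (out : Int) : Decidable (Spec_furthest_descendant i head direction out) := by unfold Spec_furthest_descendant; infer_instance

def pvDiffWitness_furthest_descendant : Int × List Int × String := (-1, ([-1, 0], "left"))
def pvDiffWitnessOut_furthest_descendant : Int × Int := (0, -1)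

-- ===== CLAIM (what is proved, stated in full; the proofs are below) =====
def Claim_unchanged_furthest_descendant : Prop := ∀ (i : Int) (head : List Int) (direction : String), Dom_furthest_descendant i head direction → Spec_furthest_descendant i head direction (furthest_descendant i head direction)
def Claim_changed_furthest_descendant : Prop := Dom_furthest_descendant (pvDiffWitness_furthest_descendant.1) (pvDiffWitness_furthest_descendant.2.1) (pvDiffWitness_furthest_descendant.2.2) ∧ D_furthest_descendant (pvDiffWitness_furthest_descendant.1) (pvDiffWitness_furthest_descendant.2.1) (pvDiffWitness_furthest_descendant.2.2) ∧ furthest_descendant (pvDiffWitness_furthest_descendant.1) (pvDiffWitness_furthest_descendant.2.1) (pvDiffWitness_furthest_descendant.2.2) = pvDiffWitnessOut_furthest_descendant.1 ∧ furthest_descendant_alt (pvDiffWitness_furthest_descendant.1) (pvDiffWitness_furthest_descendant.2.1) (pvDiffWitness_furthest_descendant.2.2) = pvDiffWitnessOut_furthest_descendant.2 ∧ pvDiffWitnessOut_furthest_descendant.1 ≠ pvDiffWitnessOut_furthest_descendant.2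
def Claim_exact_furthest_descendant : Prop := ∀ (i : Int) (head : List Int) (direction : String), Dom_furthest_descendant i head direction → D_furthest_descendant i head direction → furthest_descendant i head direction ≠ furthest_descendant_alt i head direction

-- ===== LEMMAS AND PROOFS =====

-- one right-extension step of the building fold
theorem fdDicts_append (xs : List Int) (x : Int) :
    fdDicts (xs ++ [x]) =
      ((if (fdDicts xs).1.contains x then (fdDicts xs).1
        else (fdDicts xs).1.insert x (0 + (xs.length : Int))),
       (fdDicts xs).2.insert x (0 + (xs.length : Int))) := by
  unfold fdDicts
  rw [PySem.List.enumerate_append, List.foldl_append]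
  simp [PySem.List.enumerate]

theorem fd_index?_append_singleton_of_ne (xs : List Int) (x v : Int) (h : v ≠ x) :
    PySem.List.index? (xs ++ [x]) v = PySem.List.index? xs v := by
  by_cases hm : v ∈ xs
  · exact PySem.List.index?_append_of_mem [x] hm
  · rw [(PySem.List.index?_eq_none_iff xs v).mpr hm]
    rw [(PySem.List.index?_eq_none_iff (xs ++ [x]) v).mpr (by simp [hm, h])]

theorem fdDicts_get?_aux (head : List Int) : ∀ v : Int,
    ((fdDicts head).1.get? v = (PySem.List.index? head v).map (fun j => (j : Int))) ∧
    ((fdDicts head).2.get? v =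
      (PySem.List.index? head.reverse v).map (fun r => (head.length : Int) - 1 - (r : Int))) := by
  induction head using List.reverseRecOn with
  | nil =>
    intro v
    simp [fdDicts, PySem.List.enumerate, PySem.List.index?, List.idxOf?]
  | append_singleton xs x ih =>
    intro v
    rw [fdDicts_append]
    constructor
    · -- first-occurrence dictionary
      by_cases hc : (fdDicts xs).1.contains x = true
      · rw [if_pos hc]
        have hx : x ∈ xs := by
          rw [PySem.Dict.contains_eq_isSome_get?, (ih x).1] at hc
          cases hji : PySem.List.index? xs x with
          | none => rw [hji] at hc; simp at hc
          | some j =>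
            obtain ⟨hk, heq, -⟩ := PySem.List.getElem_of_index?_eq_some hji
            exact heq ▸ List.getElem_mem hk
        by_cases hv : v = x
        · rw [hv, PySem.List.index?_append_of_mem [x] hx]
          exact (ih x).1
        · rw [fd_index?_append_singleton_of_ne xs x v hv]
          exact (ih v).1
      · rw [if_neg hc]
        have hx : x ∉ xs := by
          rw [PySem.Dict.contains_eq_isSome_get?, (ih x).1] at hc
          intro hmem
          apply hc
          rw [← PySem.List.index?_isSome_iff] at hmem
          cases hji : PySem.List.index? xs x with
          | none => rw [hji] at hmem; simp at hmem
          | some j => simp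
        rw [PySem.Dict.get?_insert]
        by_cases hv : v = x
        · rw [if_pos hv, hv, PySem.List.index?_append_singleton_self xs x hx]
          simp
        · rw [if_neg hv, fd_index?_append_singleton_of_ne xs x v hv]
          exact (ih v).1
    · -- last-occurrence dictionary
      rw [PySem.Dict.get?_insert, List.reverse_append]
      simp only [List.reverse_cons, List.reverse_nil, List.nil_append, List.singleton_append]
      by_cases hv : v = x
      · rw [if_pos hv, hv, PySem.List.index?_cons_self]
        simp
      · rw [if_neg hv, PySem.List.index?_cons_of_ne xs.reverse (fun h => hv h.symm)]
        rw [(ih v).2]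
        cases hji : PySem.List.index? xs.reverse v with
        | none => simp
        | some r =>
          simp only [Option.map_some, Option.some.injEq,
            Option.bind_eq_bind, Option.bind_some, Option.pure_def,
            List.length_append, List.length_singleton]
          omega

theorem fdDicts_fst_get? (head : List Int) (v : Int) :
    ((fdDicts head).1.get? v) = (PySem.List.index? head v).map (fun j => (j : Int)) :=
  (fdDicts_get?_aux head v).1

theorem fdDicts_snd_get? (head : List Int) (v : Int) :
    ((fdDicts head).2.get? v) =
      (PySem.List.index? head.reverse v).map (fun r => (head.length : Int) - 1 - (r : Int)) :=
  (fdDicts_get?_aux head v).2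

-- one-step unfolding equations, A side
theorem fdA_left_nomem (head : List Int) (i : Int) (hm : i ∉ PySem.List.slice head none (some i)) :
    furthest_descendant i head "left" = i := by
  rw [furthest_descendant.eq_def, dif_pos rfl, dif_pos hm]

theorem fdA_left_mem (head : List Int) (i : Int) (hm : i ∈ PySem.List.slice head none (some i)) :
    furthest_descendant i head "left" =
      furthest_descendant (((PySem.List.index? head i).getD 0 : Nat) : Int) head "left" := by
  rw [furthest_descendant.eq_def, dif_pos rfl, dif_neg (not_not_intro hm)]

theorem fdA_right_nomem (head : List Int) (i : Int) (d : String) (hd : d ≠ "left")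
    (hm : i ∉ PySem.List.slice head (some (i + 1)) none) :
    furthest_descendant i head d = i := by
  rw [furthest_descendant.eq_def, dif_neg hd, dif_pos hm]

theorem fdA_right_mem (head : List Int) (i : Int) (d : String) (hd : d ≠ "left")
    (hm : i ∈ PySem.List.slice head (some (i + 1)) none) :
    furthest_descendant i head d =
      furthest_descendant
        ((head.length : Int) - 1 - ((PySem.List.index? head.reverse i).getD 0 : Nat))
        head "right" := by
  rw [furthest_descendant.eq_def, dif_neg hd, dif_neg (not_not_intro hm)]

-- one-step unfolding equations, B side
theorem fdLeft_succ_none (first : PySem.Dict Int Int) (fuel : Nat) (cur : Int)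
    (h : first.get? cur = none) : fdLeft first (fuel + 1) cur = cur := by
  simp [fdLeft, h]

theorem fdLeft_succ_some (first : PySem.Dict Int Int) (fuel : Nat) (cur j : Int)
    (h : first.get? cur = some j) :
    fdLeft first (fuel + 1) cur = if j < cur then fdLeft first fuel j else cur := by
  simp [fdLeft, h]

theorem fdRight_succ_none (last : PySem.Dict Int Int) (fuel : Nat) (cur : Int)
    (h : last.get? cur = none) : fdRight last (fuel + 1) cur = cur := by
  simp [fdRight, h]

theorem fdRight_succ_some (last : PySem.Dict Int Int) (fuel : Nat) (cur j : Int)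
    (h : last.get? cur = some j) :
    fdRight last (fuel + 1) cur = if cur < j then fdRight last fuel j else cur := by
  simp [fdRight, h]

-- A's left recursion and B's left loop agree on nonnegative cur
theorem fd_left_eq (head : List Int) : ∀ (fuel : Nat) (i : Int), 0 ≤ i →
    (min i (head.length : Int)).toNat < fuel →
    furthest_descendant i head "left" = fdLeft (fdDicts head).1 fuel i := by
  intro fuel
  induction fuel with
  | zero => intro i h0 hk; omega
  | succ fuel ih =>
    intro i h0 hk
    cases hji : PySem.List.index? head i with
    | none =>
      rw [fdLeft_succ_none _ _ _ (by rw [fdDicts_fst_get?, hji]; rfl)]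
      apply fdA_left_nomem
      intro hmem
      rw [fd_slice_none_some] at hmem
      exact (PySem.List.index?_eq_none_iff head i).mp hji (List.mem_of_mem_take hmem)
    | some j =>
      rw [fdLeft_succ_some _ _ _ ((j : Int)) (by rw [fdDicts_fst_get?, hji]; rfl)]
      have hjn : j < head.length := by
        obtain ⟨hk', -, -⟩ := PySem.List.getElem_of_index?_eq_some hji
        exact hk'
      have hcl := (fd_clampIdx_cases head.length i).1 h0
      by_cases hlt : (j : Int) < i
      · rw [if_pos hlt]
        rw [fdA_left_mem head i (by
            rw [fd_slice_none_some, fd_mem_take_iff]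
            exact ⟨j, hji, by omega⟩)]
        rw [hji]
        simp only [Option.getD_some]
        exact ih ((j : Nat) : Int) (by omega) (by omega)
      · rw [if_neg hlt]
        apply fdA_left_nomem
        rw [fd_slice_none_some, fd_mem_take_iff]
        rintro ⟨j', hj', hlt'⟩
        rw [hji] at hj'
        cases hj'
        omega

-- A's right recursion and B's right loop agree on nonnegative cur
theorem fd_right_eq (head : List Int) : ∀ (fuel : Nat) (d : String), d ≠ "left" →
    ∀ (i : Int), 0 ≤ i →
    head.length - PySem.List.clampIdx head.length (i + 1) < fuel →
    furthest_descendant i head d = fdRight (fdDicts head).2 fuel i := by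
  intro fuel
  induction fuel with
  | zero => intro d hd i h0 hk; omega
  | succ fuel ih =>
    intro d hd i h0 hk
    cases hri : PySem.List.index? head.reverse i with
    | none =>
      rw [fdRight_succ_none _ _ _ (by rw [fdDicts_snd_get?, hri]; rfl)]
      apply fdA_right_nomem head i d hd
      intro hmem
      rw [PySem.List.slice_some_none, fd_mem_drop_iff] at hmem
      obtain ⟨r, hr, -⟩ := hmem
      rw [hri] at hr
      cases hr
    | some r =>
      have hrn : r < head.length := by
        obtain ⟨hk', -, -⟩ := PySem.List.getElem_of_index?_eq_some hri
        simpa using hk'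
      rw [fdRight_succ_some _ _ _ ((head.length : Int) - 1 - (r : Int))
        (by rw [fdDicts_snd_get?, hri]; rfl)]
      have hcl := (fd_clampIdx_cases head.length (i + 1)).1 (by omega)
      by_cases hlt : i < (head.length : Int) - 1 - (r : Int)
      · rw [if_pos hlt]
        rw [fdA_right_mem head i d hd (by
            rw [PySem.List.slice_some_none, fd_mem_drop_iff]
            exact ⟨r, hri, by omega⟩)]
        rw [hri]
        simp only [Option.getD_some]
        have hcl2 := (fd_clampIdx_cases head.length
          ((head.length : Int) - 1 - (r : Int) + 1)).1 (by omega)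
        exact ih "right" (by decide) _ (by omega) (by omega)
      · rw [if_neg hlt]
        apply fdA_right_nomem head i d hd
        rw [PySem.List.slice_some_none, fd_mem_drop_iff]
        rintro ⟨r', hr', hlt'⟩
        rw [hri] at hr'
        cases hr'
        omega

-- B's left loop never moves off a negative cur (dictionary values are indices, hence ≥ 0)
theorem fdLeft_neg (head : List Int) (fuel : Nat) (cur : Int) (h : cur < 0) :
    fdLeft (fdDicts head).1 fuel cur = cur := by
  cases fuel with
  | zero => rfl
  | succ fuel =>
    cases hji : PySem.List.index? head cur with
    | none => exact fdLeft_succ_none _ _ _ (by rw [fdDicts_fst_get?, hji]; rfl)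
    | some j =>
      rw [fdLeft_succ_some _ _ _ ((j : Int)) (by rw [fdDicts_fst_get?, hji]; rfl)]
      rw [if_neg (by omega)]

theorem fdLeft_nonneg (head : List Int) : ∀ (fuel : Nat) (cur : Int), 0 ≤ cur →
    0 ≤ fdLeft (fdDicts head).1 fuel cur := by
  intro fuel
  induction fuel with
  | zero => intro cur h; exact h
  | succ fuel ih =>
    intro cur h
    cases hji : PySem.List.index? head cur with
    | none =>
      rw [fdLeft_succ_none _ _ _ (by rw [fdDicts_fst_get?, hji]; rfl)]
      exact h
    | some j =>
      rw [fdLeft_succ_some _ _ _ ((j : Int)) (by rw [fdDicts_fst_get?, hji]; rfl)]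
      by_cases hlt : (j : Int) < cur
      · rw [if_pos hlt]
        exact ih _ (by omega)
      · rw [if_neg hlt]
        exact h

theorem fdRight_nonneg (head : List Int) : ∀ (fuel : Nat) (cur : Int), 0 ≤ cur →
    0 ≤ fdRight (fdDicts head).2 fuel cur := by
  intro fuel
  induction fuel with
  | zero => intro cur h; exact h
  | succ fuel ih =>
    intro cur h
    cases hri : PySem.List.index? head.reverse cur with
    | none =>
      rw [fdRight_succ_none _ _ _ (by rw [fdDicts_snd_get?, hri]; rfl)]
      exact h
    | some r =>
      have hrn : r < head.length := by
        obtain ⟨hk', -, -⟩ := PySem.List.getElem_of_index?_eq_some hri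
        simpa using hk'
      rw [fdRight_succ_some _ _ _ ((head.length : Int) - 1 - (r : Int))
        (by rw [fdDicts_snd_get?, hri]; rfl)]
      by_cases hlt : cur < (head.length : Int) - 1 - (r : Int)
      · rw [if_pos hlt]
        exact ih _ (by omega)
      · rw [if_neg hlt]
        exact h

-- A's left recursion starting at a nonnegative index returns a nonnegative index
theorem fdA_left_nonneg (head : List Int) (i : Int) (h : 0 ≤ i) :
    0 ≤ furthest_descendant i head "left" := by
  rw [fd_left_eq head (head.length + 2) i h (by omega)]
  exact fdLeft_nonneg head _ i h

-- ===== VERDICT (by name: the statements are the Claim_ definitions above) =====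
theorem furthest_descendant_spec : Claim_unchanged_furthest_descendant := by
  intro i head direction hdom hnD
  unfold furthest_descendant_alt
  by_cases hdir : direction = "left"
  · subst hdir
    rw [if_pos rfl]
    by_cases hi : 0 ≤ i
    · exact fd_left_eq head _ i hi (by omega)
    · rw [fdLeft_neg head _ i (by omega)]
      have h2 : ¬ ((PySem.List.index? head i).any
          (fun j => decide ((j : Int) < (head.length : Int) + i)) = true) := by
        intro h
        exact hnD ⟨by omega, by rw [if_pos rfl]; exact h⟩
      apply fdA_left_nomem
      rw [fd_slice_none_some, fd_mem_take_iff]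
      rintro ⟨j, hj, hjm⟩
      have hcl := (fd_clampIdx_cases head.length i).2 (by omega)
      rw [hj] at h2
      simp at h2
      omega
  · rw [if_neg hdir]
    by_cases hi : 0 ≤ i
    · refine fd_right_eq head _ direction hdir i hi ?_
      have hcl := (fd_clampIdx_cases head.length (i + 1)).1 (by omega)
      omega
    · cases hri : PySem.List.index? head.reverse i with
      | none =>
        obtain ⟨f, hf⟩ : ∃ f, head.length + 2 = f + 1 := ⟨head.length + 1, rfl⟩
        rw [hf, fdRight_succ_none _ _ _ (by rw [fdDicts_snd_get?, hri]; rfl)]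
        apply fdA_right_nomem head i direction hdir
        rw [PySem.List.slice_some_none, fd_mem_drop_iff]
        rintro ⟨r, hr, -⟩
        rw [hri] at hr
        cases hr
      | some r =>
        have hrn : r < head.length := by
          obtain ⟨hk', -, -⟩ := PySem.List.getElem_of_index?_eq_some hri
          simpa using hk'
        have h2 : ¬ ((PySem.List.index? head.reverse i).any
            (fun r => decide (i < -1 ∧ 0 < i + (r : Int) + 2)) = true) := by
          intro h
          exact hnD ⟨by omega, by rw [if_neg hdir]; exact h⟩
        rw [hri] at h2
        simp at h2
        obtain ⟨f, hf⟩ : ∃ f, head.length + 2 = f + 1 := ⟨head.length + 1, rfl⟩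
        rw [hf, fdRight_succ_some _ _ _ ((head.length : Int) - 1 - (r : Int))
          (by rw [fdDicts_snd_get?, hri]; rfl)]
        rw [if_pos (by omega)]
        rw [fdA_right_mem head i direction hdir (by
          rw [PySem.List.slice_some_none, fd_mem_drop_iff]
          refine ⟨r, hri, ?_⟩
          have hc := fd_clampIdx_cases head.length (i + 1)
          by_cases hneg : i + 1 < 0
          · have := hc.2 hneg; omega
          · have := hc.1 (by omega); omega)]
        rw [hri]
        simp only [Option.getD_some]
        have hcl2 := (fd_clampIdx_cases head.length
          ((head.length : Int) - 1 - (r : Int) + 1)).1 (by omega)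
        exact fd_right_eq head f "right" (by decide) _ (by omega) (by omega)

theorem furthest_descendant_changed : Claim_changed_furthest_descendant := by
  unfold Claim_changed_furthest_descendant
  refine ⟨by decide, by decide, ?_, by decide, by decide⟩
  show furthest_descendant (-1) [-1, 0] "left" = 0
  rw [fdA_left_mem [(-1 : Int), 0] (-1) (by decide)]
  have e : (((PySem.List.index? [(-1 : Int), 0] (-1)).getD 0 : Nat) : Int) = 0 := by decide
  rw [e]
  exact fdA_left_nomem [(-1 : Int), 0] 0 (by decide)

theorem furthest_descendant_tight : Claim_exact_furthest_descendant := by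
  intro i head direction hdom hD
  obtain ⟨hi, hcond⟩ := hD
  unfold furthest_descendant_alt
  by_cases hdir : direction = "left"
  · subst hdir
    rw [if_pos rfl] at hcond ⊢
    rw [fdLeft_neg head _ i hi]
    cases hji : PySem.List.index? head i with
    | none => rw [hji] at hcond; simp at hcond
    | some j =>
      rw [hji] at hcond
      simp at hcond
      have hjn : j < head.length := by
        obtain ⟨hk', -, -⟩ := PySem.List.getElem_of_index?_eq_some hji
        exact hk'
      have hcl := (fd_clampIdx_cases head.length i).2 (by omega)
      rw [fdA_left_mem head i (by
        rw [fd_slice_none_some, fd_mem_take_iff]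
        exact ⟨j, hji, by omega⟩)]
      rw [hji]
      simp only [Option.getD_some]
      have hge := fdA_left_nonneg head ((j : Nat) : Int) (by omega)
      omega
  · rw [if_neg hdir] at hcond ⊢
    cases hri : PySem.List.index? head.reverse i with
    | none => rw [hri] at hcond; simp at hcond
    | some r =>
      rw [hri] at hcond
      simp at hcond
      obtain ⟨hi1, hir⟩ := hcond
      have hrn : r < head.length := by
        obtain ⟨hk', -, -⟩ := PySem.List.getElem_of_index?_eq_some hri
        simpa using hk'
      rw [fdA_right_nomem head i direction hdir (by
        rw [PySem.List.slice_some_none, fd_mem_drop_iff]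
        rintro ⟨r', hr', hlt'⟩
        rw [hri] at hr'
        cases hr'
        have hc := (fd_clampIdx_cases head.length (i + 1)).2 (by omega)
        omega)]
      obtain ⟨f, hf⟩ : ∃ f, head.length + 2 = f + 1 := ⟨head.length + 1, rfl⟩
      rw [hf, fdRight_succ_some _ _ _ ((head.length : Int) - 1 - (r : Int))
        (by rw [fdDicts_snd_get?, hri]; rfl)]
      rw [if_pos (by omega)]
      have hge := fdRight_nonneg head f ((head.length : Int) - 1 - (r : Int)) (by omega)
      omega
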